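-- pv_equiv track=rewrite | github.com/EdwardZehuaZhang/3d-printing-monorepo | rhino8-internal-wire/actual pluggin folder/rh8/libs/UNNcBibN/wire_router/core.py | _has_nonlocal_close_approach
-- ===== SOURCE A (Python) =====
-- from typing import Dict, FrozenSet, Iterable, Iterator, List, Optional, Sequence, Set, Tuple
--
-- GridIndex = Tuple[int, int, int]
--
-- _DILATION_OFFSET_CACHE: Dict[int, Tuple[Tuple[int, int, int], ...]] = {}
--
-- def _dilation_offsets(radius: int) -> Tuple[Tuple[int, int, int], ...]:
--     """Return cached offset tuples for the given Chebyshev radius."""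
--     if radius in _DILATION_OFFSET_CACHE:
--         return _DILATION_OFFSET_CACHE[radius]
--     offsets = tuple(
--         (dx, dy, dz)
--         for dx in range(-radius, radius + 1)
--         for dy in range(-radius, radius + 1)
--         for dz in range(-radius, radius + 1)
--     )
--     _DILATION_OFFSET_CACHE[radius] = offsets
--     return offsets
--
-- def _has_nonlocal_close_approach(
--     path: Sequence[GridIndex],
--     radius: int,
--     local_window: int = 3,
-- ) -> bool:
--     if radius <= 0:
--         return len(set(path)) != len(path)
--
--     # Spatial-dict approach: O(n * r^3) instead of O(n^2).
--     offsets = _dilation_offsets(radius)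
--     earliest: Dict[GridIndex, int] = {}
--     for i, cell in enumerate(path):
--         for dx, dy, dz in offsets:
--             nb = (cell[0] + dx, cell[1] + dy, cell[2] + dz)
--             if nb in earliest and i - earliest[nb] > local_window:
--                 return True
--         if cell not in earliest:
--             earliest[cell] = i
--     return False
-- ===== SOURCE B (Python) =====
-- def _has_nonlocal_close_approach(path, radius, local_window=3):
--     if radius <= 0:
--         seen = set()
--         for cell in path:
--             if cell in seen:
--                 return True
--             seen.add(cell)
--         return False
--
--     # Direct pair scan: a non-local close approach exists iff some two cells
--     # at sequence distance > local_window lie within Chebyshev `radius`.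
--     prefix = []
--     for i, cell in enumerate(path):
--         for j, other in enumerate(prefix):
--             if (i - j > local_window
--                     and abs(cell[0] - other[0]) <= radius
--                     and abs(cell[1] - other[1]) <= radius
--                     and abs(cell[2] - other[2]) <= radius):
--                 return True
--         prefix.append(cell)
--     return False
-- ===== Notes on version B (the rewrite author's own statement) =====
-- stated objective: faster
-- what changed: B drops A's spatial dict and r^3 offset dilation entirely: it detects duplicates with an early-exit seen-set, and for radius>0 scans pairs directly (each cell against the prefix of earlier cells), testing i-j>local_window and per-coordinate |difference|<=radius; correct because a hit via A's first-index dict exists iff some such pair exists.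
import Mathlib
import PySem

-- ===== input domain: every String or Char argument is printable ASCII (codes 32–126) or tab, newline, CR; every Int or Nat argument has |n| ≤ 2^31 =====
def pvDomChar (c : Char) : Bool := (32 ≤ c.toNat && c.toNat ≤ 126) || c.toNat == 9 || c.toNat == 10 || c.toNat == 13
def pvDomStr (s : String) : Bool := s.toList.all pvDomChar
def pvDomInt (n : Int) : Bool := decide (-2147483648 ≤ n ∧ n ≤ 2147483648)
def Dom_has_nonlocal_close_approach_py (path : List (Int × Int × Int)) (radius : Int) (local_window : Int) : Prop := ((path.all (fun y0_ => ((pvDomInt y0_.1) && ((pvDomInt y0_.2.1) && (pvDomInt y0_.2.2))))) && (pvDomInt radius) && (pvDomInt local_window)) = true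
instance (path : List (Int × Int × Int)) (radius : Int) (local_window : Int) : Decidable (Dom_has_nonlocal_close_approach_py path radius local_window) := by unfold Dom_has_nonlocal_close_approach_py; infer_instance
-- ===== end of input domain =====

-- B replaces A's spatial dict + r^3 offset dilation by an early-exit seen-set for the
-- duplicate branch and a direct pair scan (current cell vs pre of earlier cells) for
-- radius>0; the cost no longer depends on the radius (O(n^2) instead of O(n*r^3)).

-- ===== PORT A =====
-- _dilation_offsets (its module-level cache is an optimization with no observable effect)
def pvOffsetsA (radius : Int) : List (Int × Int × Int) :=
  (PySem.List.pyRange (-radius) (radius + 1) 1).flatMap (fun dx =>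
    (PySem.List.pyRange (-radius) (radius + 1) 1).flatMap (fun dy =>
      (PySem.List.pyRange (-radius) (radius + 1) 1).map (fun dz => (dx, dy, dz))))

def pvLoopA (offs : List (Int × Int × Int)) (local_window : Int) :
    List (Int × (Int × Int × Int)) → PySem.Dict (Int × Int × Int) Int → Bool
  | [], _ => false
  | (i, cell) :: rest, earliest =>
    if offs.any (fun o =>
        match earliest.get? (cell.1 + o.1, cell.2.1 + o.2.1, cell.2.2 + o.2.2) with
        | some j => decide (i - j > local_window)
        | none => false) then
      true
    else
      pvLoopA offs local_window rest
        (if earliest.contains cell then earliest else earliest.insert cell i)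

def has_nonlocal_close_approach_py (path : List (Int × Int × Int)) (radius : Int) (local_window : Int) : Bool :=
  if radius ≤ 0 then
    decide (PySem.Set.len (PySem.Set.ofList path) ≠ (path.length : Int))
  else
    pvLoopA (pvOffsetsA radius) local_window (PySem.List.enumerate path 0) PySem.Dict.empty

-- ===== PORT B =====
-- duplicate detection with an early-exit seen-set
def pvDupB : List (Int × Int × Int) → PySem.Set (Int × Int × Int) → Bool
  | [], _ => false
  | cell :: rest, seen =>
    if PySem.Set.contains seen cell then true
    else pvDupB rest (PySem.Set.add seen cell)

-- the inner 'if' condition of B's pair scan (short-circuit 'and' chain)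
def pvFarCloseB (radius local_window i : Int) (cell : Int × Int × Int)
    (p : Int × (Int × Int × Int)) : Bool :=
  decide (i - p.1 > local_window) && decide (|cell.1 - p.2.1| ≤ radius) &&
    decide (|cell.2.1 - p.2.2.1| ≤ radius) && decide (|cell.2.2 - p.2.2.2| ≤ radius)

def pvLoopB (radius local_window : Int) :
    List (Int × (Int × Int × Int)) → List (Int × Int × Int) → Bool
  | [], _ => false
  | (i, cell) :: rest, pre =>
    if (PySem.List.enumerate pre 0).any (pvFarCloseB radius local_window i cell) then
      true
    else pvLoopB radius local_window rest (pre ++ [cell])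

def has_nonlocal_close_approach_py_alt (path : List (Int × Int × Int)) (radius : Int) (local_window : Int) : Bool :=
  if radius ≤ 0 then pvDupB path PySem.Set.empty
  else pvLoopB radius local_window (PySem.List.enumerate path 0) []

-- ===== PRECONDITION & SPEC =====
def Spec_has_nonlocal_close_approach_py (path : List (Int × Int × Int)) (radius : Int) (local_window : Int) (out : Bool) : Prop := out = has_nonlocal_close_approach_py_alt path radius local_window
instance (path : List (Int × Int × Int)) (radius : Int) (local_window : Int) (out : Bool) : Decidable (Spec_has_nonlocal_close_approach_py path radius local_window out) := by unfold Spec_has_nonlocal_close_approach_py; infer_instance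

-- ===== CLAIM (what is proved, stated in full; the proofs are below) =====
def Claim_equal_has_nonlocal_close_approach_py : Prop := ∀ (path : List (Int × Int × Int)) (radius : Int) (local_window : Int), Dom_has_nonlocal_close_approach_py path radius local_window → Spec_has_nonlocal_close_approach_py path radius local_window (has_nonlocal_close_approach_py path radius local_window)

-- ===== LEMMAS AND PROOFS =====

-- `q` is within Chebyshev distance `r` of `c`
def pvNear (r : Int) (c q : Int × Int × Int) : Prop :=
  -r ≤ q.1 - c.1 ∧ q.1 - c.1 ≤ r ∧ -r ≤ q.2.1 - c.2.1 ∧ q.2.1 - c.2.1 ≤ r ∧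
    -r ≤ q.2.2 - c.2.2 ∧ q.2.2 - c.2.2 ≤ r

lemma mem_pvOffsetsA (r : Int) (o : Int × Int × Int) :
    o ∈ pvOffsetsA r ↔
      (-r ≤ o.1 ∧ o.1 ≤ r) ∧ (-r ≤ o.2.1 ∧ o.2.1 ≤ r) ∧ (-r ≤ o.2.2 ∧ o.2.2 ≤ r) := by
  obtain ⟨a, b, c⟩ := o
  simp only [pvOffsetsA, List.mem_flatMap, List.mem_map, PySem.List.mem_pyRange_one,
    Prod.mk.injEq]
  constructor
  · rintro ⟨dx, hx, dy, hy, dz, hz, h1, h2, h3⟩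
    subst h1; subst h2; subst h3; omega
  · rintro ⟨h1, h2, h3⟩
    exact ⟨a, by omega, b, by omega, c, by omega, rfl, rfl, rfl⟩

-- the dilated image of `cell` covers exactly the near cells
lemma hit_iff_pvNear (r : Int) (cell q : Int × Int × Int) :
    (∃ o ∈ pvOffsetsA r, (cell.1 + o.1, cell.2.1 + o.2.1, cell.2.2 + o.2.2) = q) ↔
      pvNear r cell q := by
  constructor
  · rintro ⟨o, ho, hq⟩
    rw [mem_pvOffsetsA] at ho
    obtain ⟨q1, q2, q3⟩ := q
    simp only [Prod.mk.injEq] at hq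
    simp only [pvNear]; omega
  · intro hn
    refine ⟨(q.1 - cell.1, q.2.1 - cell.2.1, q.2.2 - cell.2.2), ?_, ?_⟩
    · rw [mem_pvOffsetsA]
      obtain ⟨h1, h2, h3, h4, h5, h6⟩ := hn
      exact ⟨⟨by omega, by omega⟩, ⟨by omega, by omega⟩, by omega, by omega⟩
    · obtain ⟨q1, q2, q3⟩ := q
      simp only [Prod.mk.injEq]; omega

-- minimal element of a filtered finite list of indexed pairs
lemma pv_exists_min (P : Int × (Int × Int × Int) → Prop) :
    ∀ (seen : List (Int × (Int × Int × Int))), (∃ p ∈ seen, P p) →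
      ∃ p ∈ seen, P p ∧ ∀ p' ∈ seen, P p' → p.1 ≤ p'.1 := by
  intro seen
  induction seen with
  | nil => rintro ⟨p, hp, _⟩; cases hp
  | cons a s ih =>
    intro h
    by_cases ha : P a
    · by_cases hs : ∃ p ∈ s, P p
      · obtain ⟨p, hps, hPp, hmin⟩ := ih hs
        rcases le_total a.1 p.1 with h1 | h1
        · refine ⟨a, List.mem_cons_self, ha, ?_⟩
          intro p' hp' hP'
          rcases List.mem_cons.mp hp' with rfl | hp'
          · exact le_refl _
          · exact le_trans h1 (hmin p' hp' hP')
        · refine ⟨p, List.mem_cons_of_mem _ hps, hPp, ?_⟩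
          intro p' hp' hP'
          rcases List.mem_cons.mp hp' with rfl | hp'
          · exact h1
          · exact hmin p' hp' hP'
      · refine ⟨a, List.mem_cons_self, ha, ?_⟩
        intro p' hp' hP'
        rcases List.mem_cons.mp hp' with rfl | hp'
        · exact le_refl _
        · exact absurd ⟨p', hp', hP'⟩ hs
    · obtain ⟨p, hp, hP⟩ := h
      rcases List.mem_cons.mp hp with rfl | hp
      · exact absurd hP ha
      · obtain ⟨p0, hp0, hP0, hmin⟩ := ih ⟨p, hp, hP⟩
        refine ⟨p0, List.mem_cons_of_mem _ hp0, hP0, ?_⟩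
        intro p' hp' hP'
        rcases List.mem_cons.mp hp' with rfl | hp'
        · exact absurd hP' ha
        · exact hmin p' hp' hP'

-- invariant of A's dict: value = first (=smallest) index of exactly that cell
def pvInvA (seen : List (Int × (Int × Int × Int))) (d : PySem.Dict (Int × Int × Int) Int) : Prop :=
  ∀ c j, d.get? c = some j ↔ ((j, c) ∈ seen ∧ ∀ p ∈ seen, p.2 = c → j ≤ p.1)

lemma pvInvA_none {seen d c} (hI : pvInvA seen d) (h : d.get? c = none) :
    ∀ p ∈ seen, p.2 ≠ c := by
  intro p hp hc
  obtain ⟨p0, hp0, hP0, hmin⟩ := pv_exists_min (fun p => p.2 = c) seen ⟨p, hp, hc⟩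
  have : d.get? c = some p0.1 := by
    rw [hI]
    refine ⟨?_, fun p' hp' hc' => hmin p' hp' hc'⟩
    have : p0 = (p0.1, c) := by rw [← hP0]
    rw [← this]; exact hp0
  rw [h] at this; cases this

-- A's guard is an existence statement over the seen pairs
lemma pv_guardA_iff {r W i : Int} {cell : Int × Int × Int} {seen dA}
    (hA : pvInvA seen dA) :
    ((pvOffsetsA r).any (fun o =>
        match dA.get? (cell.1 + o.1, cell.2.1 + o.2.1, cell.2.2 + o.2.2) with
        | some j => decide (i - j > W)
        | none => false) = true) ↔
      ∃ p ∈ seen, i - p.1 > W ∧ pvNear r cell p.2 := by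
  constructor
  · intro h
    rw [List.any_eq_true] at h
    obtain ⟨o, ho, hcond⟩ := h
    revert hcond
    cases h : dA.get? (cell.1 + o.1, cell.2.1 + o.2.1, cell.2.2 + o.2.2) with
    | none => simp
    | some j =>
      intro hcond
      simp only [decide_eq_true_eq] at hcond
      have hmem := (hA _ j).mp h
      have hnear : pvNear r cell (cell.1 + o.1, cell.2.1 + o.2.1, cell.2.2 + o.2.2) :=
        (hit_iff_pvNear r cell _).mp ⟨o, ho, rfl⟩
      exact ⟨(j, _), hmem.1, hcond, hnear⟩
  · rintro ⟨p, hp, hgt, hnear⟩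
    obtain ⟨p0, hp0, hP0, hmin0⟩ :=
      pv_exists_min (fun p' => p'.2 = p.2) seen ⟨p, hp, rfl⟩
    have hgetA : dA.get? p.2 = some p0.1 := by
      rw [hA]
      refine ⟨?_, fun p' hp' hc' => hmin0 p' hp' hc'⟩
      have : p0 = (p0.1, p.2) := by rw [← hP0]
      rw [← this]; exact hp0
    rw [List.any_eq_true]
    obtain ⟨o, ho, hoq⟩ := (hit_iff_pvNear r cell p.2).mpr hnear
    refine ⟨o, ho, ?_⟩
    rw [hoq, hgetA]
    simp only [decide_eq_true_eq]
    have := hmin0 p hp rfl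
    omega

-- B's guard is the same existence statement
lemma pv_guardB_iff {r W i : Int} {cell : Int × Int × Int} {pre : List (Int × Int × Int)} :
    ((PySem.List.enumerate pre 0).any (pvFarCloseB r W i cell) = true) ↔
      ∃ p ∈ PySem.List.enumerate pre 0, i - p.1 > W ∧ pvNear r cell p.2 := by
  rw [List.any_eq_true]
  refine exists_congr fun p => and_congr_right fun _ => ?_
  simp only [pvFarCloseB, Bool.and_eq_true, decide_eq_true_eq, pvNear, abs_le]
  omega

-- A's insertion step preserves its invariant
lemma pvInvA_step {seen dA} {i : Int} {cell : Int × Int × Int}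
    (hA : pvInvA seen dA) (hlt : ∀ p ∈ seen, p.1 < i) :
    pvInvA (seen ++ [(i, cell)]) (if dA.contains cell then dA else dA.insert cell i) := by
  by_cases hc : dA.contains cell = true
  · rw [if_pos hc]
    have hne : dA.get? cell ≠ none := by
      intro h
      rw [PySem.Dict.get?_eq_none_iff_contains] at h
      rw [hc] at h; cases h
    obtain ⟨j0, hj0⟩ : ∃ j0, dA.get? cell = some j0 := by
      cases h : dA.get? cell with
      | none => exact absurd h hne
      | some j => exact ⟨j, rfl⟩
    have hj0' := (hA cell j0).mp hj0
    intro c j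
    rw [hA c j]
    constructor
    · rintro ⟨hmem, hmin⟩
      refine ⟨List.mem_append_left _ hmem, ?_⟩
      intro p hp hpc
      rcases List.mem_append.mp hp with hp | hp
      · exact hmin p hp hpc
      · simp only [List.mem_singleton] at hp
        subst hp
        simp only at hpc
        subst hpc
        have h1 := hmin (j0, cell) hj0'.1 rfl
        have h2 := hlt (j0, cell) hj0'.1
        simp only at h1 h2 ⊢; omega
    · rintro ⟨hmem, hmin⟩
      rcases List.mem_append.mp hmem with hmem | hmem
      · refine ⟨hmem, ?_⟩
        intro p hp hpc
        exact hmin p (List.mem_append_left _ hp) hpc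
      · simp only [List.mem_singleton, Prod.mk.injEq] at hmem
        have h1 := hmin (j0, cell) (List.mem_append_left _ hj0'.1) hmem.2.symm
        have h2 := hlt (j0, cell) hj0'.1
        have h3 := hmem.1
        simp only at h1 h2
        omega
  · rw [if_neg hc]
    have hnone : dA.get? cell = none := by
      rw [PySem.Dict.get?_eq_none_iff_contains]
      simpa using hc
    have hfresh : ∀ p ∈ seen, p.2 ≠ cell := pvInvA_none hA hnone
    intro c j
    by_cases hcc : c = cell
    · subst hcc
      rw [PySem.Dict.get?_insert_self]
      constructor
      · intro h
        have hj : j = i := by injection h with h; omega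
        subst hj
        refine ⟨List.mem_append_right _ (List.mem_singleton.mpr rfl), ?_⟩
        intro p hp hpc
        rcases List.mem_append.mp hp with hp | hp
        · exact absurd hpc (hfresh p hp)
        · simp only [List.mem_singleton] at hp; subst hp; simp
      · rintro ⟨hmem, _⟩
        rcases List.mem_append.mp hmem with hmem | hmem
        · exact absurd rfl (hfresh (j, c) hmem)
        · simp only [List.mem_singleton, Prod.mk.injEq] at hmem
          rw [hmem.1]
    · rw [PySem.Dict.get?_insert_of_ne _ _ hcc, hA c j]
      constructor
      · rintro ⟨hmem, hmin⟩
        refine ⟨List.mem_append_left _ hmem, ?_⟩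
        intro p hp hpc
        rcases List.mem_append.mp hp with hp | hp
        · exact hmin p hp hpc
        · simp only [List.mem_singleton] at hp
          subst hp
          simp only at hpc
          exact absurd hpc.symm hcc
      · rintro ⟨hmem, hmin⟩
        rcases List.mem_append.mp hmem with hmem | hmem
        · exact ⟨hmem, fun p hp hpc => hmin p (List.mem_append_left _ hp) hpc⟩
        · simp only [List.mem_singleton, Prod.mk.injEq] at hmem
          exact absurd hmem.2 hcc

-- indices produced by enumerate from 0 are below the list length
lemma pv_enum_lt (pre : List (Int × Int × Int)) :
    ∀ p ∈ PySem.List.enumerate pre 0, p.1 < (pre.length : Int) := by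
  intro p hp
  rw [PySem.List.mem_enumerate_iff] at hp
  obtain ⟨k, hk, rfl⟩ := hp
  simp only
  omega

-- the two loops agree step for step (B carries the pre, A the first-index dict)
lemma pv_loops_eq (r W : Int) :
    ∀ (xs pre : List (Int × Int × Int)) dA,
      pvInvA (PySem.List.enumerate pre 0) dA →
      pvLoopA (pvOffsetsA r) W (PySem.List.enumerate xs (pre.length : Int)) dA =
        pvLoopB r W (PySem.List.enumerate xs (pre.length : Int)) pre := by
  intro xs
  induction xs with
  | nil => intro pre dA _; simp [PySem.List.enumerate_nil, pvLoopA, pvLoopB]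
  | cons x xs ih =>
    intro pre dA hA
    rw [PySem.List.enumerate_cons]
    simp only [pvLoopA, pvLoopB]
    have hg : ((pvOffsetsA r).any (fun o =>
        match dA.get? (x.1 + o.1, x.2.1 + o.2.1, x.2.2 + o.2.2) with
        | some j => decide ((pre.length : Int) - j > W)
        | none => false)) =
        ((PySem.List.enumerate pre 0).any
          (pvFarCloseB r W (pre.length : Int) x)) := by
      rw [Bool.eq_iff_iff, pv_guardA_iff hA, pv_guardB_iff]
    rw [hg]
    split
    · rfl
    · have hstep := pvInvA_step (i := (pre.length : Int)) (cell := x) hA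
        (pv_enum_lt pre)
      have henum : PySem.List.enumerate (pre ++ [x]) 0 =
          PySem.List.enumerate pre 0 ++ [((pre.length : Int), x)] := by
        rw [PySem.List.enumerate_append]
        simp [PySem.List.enumerate_cons, PySem.List.enumerate_nil]
      rw [← henum] at hstep
      have hlen : (pre.length : Int) + 1 = ((pre ++ [x]).length : Int) := by
        simp
      rw [hlen]
      exact ih (pre ++ [x]) _ hstep

-- B's duplicate loop reports a repeat in `xs` or a collision with `seen`
lemma pvDupB_iff :
    ∀ (xs : List (Int × Int × Int)) (seen : PySem.Set (Int × Int × Int)),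
      pvDupB xs seen = decide (¬ xs.Nodup ∨ ∃ c ∈ xs, c ∈ seen) := by
  intro xs
  induction xs with
  | nil => intro seen; simp [pvDupB]
  | cons c xs ih =>
    intro seen
    simp only [pvDupB]
    by_cases hc : c ∈ seen
    · rw [if_pos (by rwa [PySem.Set.contains_iff])]
      exact (decide_eq_true (Or.inr ⟨c, List.mem_cons_self, hc⟩)).symm
    · rw [if_neg (by simp only [PySem.Set.contains_iff]; exact hc), ih]
      congr 1
      simp only [eq_iff_iff, List.nodup_cons, List.mem_cons]
      constructor
      · rintro (h | ⟨c', hc', hmem⟩)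
        · exact Or.inl (fun ⟨_, h2⟩ => h h2)
        · rcases (PySem.Set.mem_add seen c c').mp hmem with h | rfl
          · exact Or.inr ⟨c', Or.inr hc', h⟩
          · exact Or.inl (fun ⟨h1, _⟩ => h1 hc')
      · rintro (h | ⟨c', hc' | hc', hmem⟩)
        · by_cases hcx : c ∈ xs
          · exact Or.inr ⟨c, hcx, (PySem.Set.mem_add seen c c).mpr (Or.inr rfl)⟩
          · exact Or.inl (fun hn => h ⟨hcx, hn⟩)
        · subst hc'; exact absurd hmem hc
        · exact Or.inr ⟨c', hc', (PySem.Set.mem_add seen c c').mpr (Or.inl hmem)⟩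

-- set(xs) has as many elements as xs exactly when xs has no duplicate
lemma pv_len_ofList_iff :
    ∀ xs : List (Int × Int × Int),
      (PySem.Set.ofList xs).length = xs.length ↔ xs.Nodup := by
  intro xs
  induction xs using List.reverseRecOn with
  | nil => simp
  | append_singleton ys x ih =>
    rw [PySem.Set.ofList_append_singleton, PySem.Set.add_eq_ite]
    have hnd : (ys ++ [x]).Nodup ↔ ys.Nodup ∧ x ∉ ys := by
      rw [List.nodup_append]
      constructor
      · rintro ⟨h1, _, h3⟩
        exact ⟨h1, fun hx => h3 x hx x (List.mem_singleton.mpr rfl) rfl⟩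
      · rintro ⟨h1, h2⟩
        refine ⟨h1, List.nodup_singleton x, ?_⟩
        intro a ha b hb hab
        rw [List.mem_singleton.mp hb] at hab
        rw [hab] at ha
        exact h2 ha
    by_cases hx : x ∈ ys
    · rw [if_pos (by rwa [PySem.Set.mem_ofList])]
      have hle := PySem.Set.length_ofList_le (xs := ys)
      simp only [List.length_append, List.length_singleton, hnd]
      constructor
      · intro h; omega
      · rintro ⟨_, hxy⟩; exact absurd hx hxy
    · rw [if_neg (by rwa [PySem.Set.mem_ofList])]
      simp only [List.length_append, List.length_singleton, hnd]
      constructor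
      · intro h; exact ⟨ih.mp (by omega), hx⟩
      · rintro ⟨h1, _⟩; rw [ih.mpr h1]

-- ===== VERDICT (by name: the statement is the Claim_ definition above) =====
theorem has_nonlocal_close_approach_py_spec : Claim_equal_has_nonlocal_close_approach_py := by
  intro path radius local_window _
  unfold Spec_has_nonlocal_close_approach_py
  unfold has_nonlocal_close_approach_py has_nonlocal_close_approach_py_alt
  by_cases hr : radius ≤ 0
  · simp only [hr, if_true]
    rw [pvDupB_iff path PySem.Set.empty]
    simp only [PySem.Set.empty]
    rw [Bool.eq_iff_iff]
    simp only [decide_eq_true_eq, PySem.Set.len]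
    constructor
    · intro h
      refine Or.inl (fun hn => h ?_)
      rw [pv_len_ofList_iff path |>.mpr hn]
    · rintro (h | ⟨c, _, hc⟩)
      · intro hlen
        exact h ((pv_len_ofList_iff path).mp (by exact_mod_cast hlen))
      · cases hc
  · simp only [hr, if_false]
    have h0 : (0 : Int) = (([] : List (Int × Int × Int)).length : Int) := by simp
    rw [h0]
    apply pv_loops_eq radius local_window path [] PySem.Dict.empty
    intro c j
    simp [PySem.Dict.get?_empty, PySem.List.enumerate_nil]
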